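-- pv_equiv track=rewrite | github.com/jakelime/db-helper | mongodb/mongodb.py | obscure_password
-- ===== SOURCE A (Python) =====
-- def obscure_password(
--     connection_str: str, mask: str = "***", partial: bool = False
-- ) -> str:
--     """
--     Return a copy of the connection str URI with the password obscured.
--
--     Examples
--     --------
--     >>> obscure_mongodb_password("mongodb://pproot:sFdDNzT5fyFPDaHSjEsS8x@localhost:27008/")
--     'mongodb://pproot:***@localhost:27008/'
--
--     >>> obscure_mongodb_password("mongodb+srv://user:Top$ecret@cluster0.example.net/db?retryWrites=true")
--     'mongodb+srv://user:***@cluster0.example.net/db?retryWrites=true'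
--
--     >>> obscure_mongodb_password("mongodb://pproot@s1.example.net,s2.example.net/db")
--     'mongodb://pproot@s1.example.net,s2.example.net/db'   # no password present -> unchanged
--
--     Parameters
--     ----------
--     uri : str
--         The MongoDB connection string.
--     mask : str
--         The replacement text for the password. Use only URL-safe characters if you
--         care about strict RFC compliance; letters/numbers are safe. Default "REDACTED".
--     partial : bool
--         If True, only partially mask (keep first and last character when available).
--
--     Notes
--     -----
--     * We rely on the fact that MongoDB credentials appear as:
--         scheme://<username>:<password>@<hosts>[/...]
--     We only modify the substring before the first '@' within the authority section.
--     * If no password (no ':' in userinfo), the URI is returned unchanged.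
--     """
--     uri = connection_str
--     if not uri:
--         raise KeyError("mongo_uri is not definted in the MongoLader")
--     scheme_sep = "://"
--     scheme_idx = uri.find(scheme_sep)
--     if scheme_idx == -1:
--         return uri  # Not a URI we recognize; leave unchanged.
--
--     auth_start = scheme_idx + len(scheme_sep)
--
--     # Determine where the authority (userinfo + hosts) segment ends
--     # (first of '/', '?', or '#' after the scheme).
--     end_authority = len(uri)
--     for sep in ("/", "?", "#"):
--         pos = uri.find(sep, auth_start)
--         if pos != -1:
--             end_authority = min(end_authority, pos)
--
--     at_idx = uri.find("@", auth_start, end_authority)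
--     if at_idx == -1:
--         return uri  # No userinfo -> nothing to mask.
--
--     userinfo = uri[auth_start:at_idx]
--     colon_idx = userinfo.find(":")
--     if colon_idx == -1:
--         return uri  # Username only -> nothing to mask.
--
--     username = userinfo[:colon_idx]
--     password = userinfo[colon_idx + 1 :]
--
--     if partial and password:
--         if len(password) == 1:
--             masked = "*"
--         elif len(password) == 2:
--             masked = password[0] + "*"
--         else:
--             masked = password[0] + ("*" * (len(password) - 2)) + password[-1]
--     else:
--         masked = mask
--
--     masked_userinfo = f"{username}:{masked}"
--     return uri[:auth_start] + masked_userinfo + uri[at_idx:]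
-- ===== SOURCE B (Python) =====
-- def obscure_password(
--     connection_str: str, mask: str = "***", partial: bool = False
-- ) -> str:
--     """Single left-to-right scanner (state machine with accumulators) instead of
--     staged find/min/slice index arithmetic."""
--     if not connection_str:
--         raise KeyError("mongo_uri is not definted in the MongoLader")
--     s = connection_str
--     n = len(s)
--     i = 0
--     while i < n and not s.startswith("://", i):
--         i += 1
--     if i == n:
--         return s  # no scheme separator -> unchanged
--     auth_start = i + 3
--     i = auth_start
--     user = []
--     pwd = None  # becomes a list once the first ':' of the userinfo is seen
--     while i < n:
--         c = s[i]
--         if c in "/?#":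
--             return s  # authority ended before any '@' -> unchanged
--         if c == "@":
--             if pwd is None:
--                 return s  # username only -> unchanged
--             password = "".join(pwd)
--             if partial and password:
--                 masked = (
--                     ("" if len(password) < 2 else password[0])
--                     + "*" * max(1, len(password) - 2)
--                     + ("" if len(password) < 3 else password[-1])
--                 )
--             else:
--                 masked = mask
--             return s[:auth_start] + "".join(user) + ":" + masked + s[i:]
--         if pwd is not None:
--             pwd.append(c)
--         elif c == ":":
--             pwd = []
--         else:
--             user.append(c)
--         i += 1
--     return s  # no '@' in the authority -> unchanged
-- ===== Notes on version B (the rewrite author's own statement) =====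
-- stated objective: alternative
-- what changed: Replaced A's staged index arithmetic (a substring find for the scheme separator, a min-fold of find over the three authority terminators, a bounded find for the at-sign, then slicing the userinfo and re-finding the colon in it) by a single left-to-right character scanner over the authority that accumulates the username and password on the fly and decides at the first terminator or at-sign it meets.
import Mathlib
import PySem

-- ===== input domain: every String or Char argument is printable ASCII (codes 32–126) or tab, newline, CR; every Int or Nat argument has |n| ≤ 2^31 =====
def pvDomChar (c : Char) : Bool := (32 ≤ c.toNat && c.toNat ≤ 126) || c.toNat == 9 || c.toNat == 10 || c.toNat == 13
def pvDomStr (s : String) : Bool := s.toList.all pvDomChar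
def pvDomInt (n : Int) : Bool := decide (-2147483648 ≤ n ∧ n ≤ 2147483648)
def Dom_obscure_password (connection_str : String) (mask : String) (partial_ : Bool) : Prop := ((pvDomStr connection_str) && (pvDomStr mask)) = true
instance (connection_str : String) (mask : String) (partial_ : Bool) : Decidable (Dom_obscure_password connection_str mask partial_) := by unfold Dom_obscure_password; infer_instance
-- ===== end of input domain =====

-- B replaces A's staged index arithmetic (find("://"), a min-fold of find over '/', '?', '#',
-- a bounded find('@'), slicing) by ONE left-to-right scanner over the authority that
-- accumulates username/password and decides at the first of '@', '/', '?', '#' (alternative; same cost).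

-- ===== PORT A =====
def obscure_password (connection_str : String) (mask : String) (partial_ : Bool) : String :=
  let uri := connection_str
  let l := uri.toList
  -- Python: `if not uri: raise KeyError(...)` — the empty string is excluded by Pre_obscure_password
  if l = [] then uri
  else
    let scheme_idx := PySem.Chars.find l [':', '/', '/']
    if scheme_idx = -1 then uri
    else
      let auth_start : Int := scheme_idx + 3
      let end_authority : Int := (l.length : Int)
      let end_authority : Int := List.foldl
        (fun e sep =>
          let pos := PySem.Chars.findFrom l [sep] auth_start none
          if pos ≠ -1 then min e pos else e)
        end_authority ['/', '?', '#']
      let at_idx := PySem.Chars.findFrom l ['@'] auth_start (some end_authority)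
      if at_idx = -1 then uri
      else
        let userinfo := PySem.List.slice l (some auth_start) (some at_idx)
        let colon_idx := PySem.Chars.find userinfo [':']
        if colon_idx = -1 then uri
        else
          let username := PySem.List.slice userinfo none (some colon_idx)
          let password := PySem.List.slice userinfo (some (colon_idx + 1)) none
          let masked : List Char :=
            if partial_ = true ∧ password ≠ [] then
              if password.length = 1 then ['*']
              else if password.length = 2 then (PySem.List.pyGet? password 0).toList ++ ['*']
              else (PySem.List.pyGet? password 0).toList ++ List.replicate (password.length - 2) '*'
                   ++ (PySem.List.pyGet? password (-1)).toList
            else mask.toList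
          String.mk (PySem.List.slice l none (some auth_start) ++ (username ++ [':'] ++ masked)
                     ++ PySem.List.slice l (some at_idx) none)

-- ===== PORT B =====
-- `s.startswith("://", i)` on the tail starting at i
def pvStartsScheme (l : List Char) : Bool :=
  match l with
  | c1 :: c2 :: c3 :: _ => c1 = ':' && c2 = '/' && c3 = '/'
  | _ => false

-- B's first while loop: advance i until "://" starts here (none = fell off the end)
def pvFindScheme : List Char → Nat → Option Nat
  | [], _ => none
  | c :: rest, i => if pvStartsScheme (c :: rest) then some i else pvFindScheme rest (i + 1)

-- B's second while loop: scan the authority, accumulating user / pwd; none = return s unchanged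
def pvAuthScan (s : List Char) (a : Nat) (mk : List Char) (p : Bool) :
    List Char → Nat → List Char → Option (List Char) → Option (List Char)
  | [], _, _, _ => none
  | c :: rest, i, user, pwdOpt =>
    if c = '/' ∨ c = '?' ∨ c = '#' then none
    else if c = '@' then
      match pwdOpt with
      | none => none
      | some pwd =>
        let masked : List Char :=
          if p = true ∧ pwd ≠ [] then
            (if pwd.length < 2 then [] else (PySem.List.pyGet? pwd 0).toList)
            ++ List.replicate (max 1 (pwd.length - 2)) '*'
            ++ (if pwd.length < 3 then [] else (PySem.List.pyGet? pwd (-1)).toList)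
          else mk
        some (s.take a ++ user ++ [':'] ++ masked ++ s.drop i)
    else
      match pwdOpt with
      | some pwd => pvAuthScan s a mk p rest (i + 1) user (some (pwd ++ [c]))
      | none =>
        if c = ':' then pvAuthScan s a mk p rest (i + 1) user (some [])
        else pvAuthScan s a mk p rest (i + 1) (user ++ [c]) none

def obscure_password_alt (connection_str : String) (mask : String) (partial_ : Bool) : String :=
  let s := connection_str.toList
  -- Python: `if not connection_str: raise KeyError(...)` — excluded by Pre_obscure_password
  if s = [] then connection_str
  else
    match pvFindScheme s 0 with
    | none => connection_str
    | some idx =>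
      match pvAuthScan s (idx + 3) mask.toList partial_ (s.drop (idx + 3)) (idx + 3) [] none with
      | none => connection_str
      | some r => String.mk r

-- ===== PRECONDITION & SPEC =====
-- Pre_ excludes only the empty string, on which A (and B) raise KeyError.
def Pre_obscure_password (connection_str : String) (mask : String) (partial_ : Bool) : Prop :=
  connection_str ≠ ""
instance (connection_str : String) (mask : String) (partial_ : Bool) : Decidable (Pre_obscure_password connection_str mask partial_) := by unfold Pre_obscure_password; infer_instance

def pvWitness_obscure_password : String × String × Bool := ("mongodb://user:pw@host:27017/db", "***", false)

def Spec_obscure_password (connection_str : String) (mask : String) (partial_ : Bool) (out : String) : Prop := out = obscure_password_alt connection_str mask partial_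
instance (connection_str : String) (mask : String) (partial_ : Bool) (out : String) : Decidable (Spec_obscure_password connection_str mask partial_ out) := by unfold Spec_obscure_password; infer_instance

-- ===== CLAIM (what is proved, stated in full; the proofs are below) =====
def Claim_equal_obscure_password : Prop := ∀ (connection_str : String) (mask : String) (partial_ : Bool), Dom_obscure_password connection_str mask partial_ → Pre_obscure_password connection_str mask partial_ → Spec_obscure_password connection_str mask partial_ (obscure_password connection_str mask partial_)

-- ===== LEMMAS AND PROOFS =====

lemma singleton_infix_iff (c : Char) (s : List Char) : [c] <:+: s ↔ c ∈ s := by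
  constructor
  · intro h; exact h.sublist.subset (List.mem_singleton_self c)
  · intro h
    obtain ⟨s1, s2, rfl⟩ := List.append_of_mem h
    exact ⟨s1, s2, by simp⟩

lemma singleton_prefix_iff (c : Char) (t : List Char) : [c] <+: t ↔ t.head? = some c := by
  cases t with
  | nil => simp
  | cons a t' =>
    constructor
    · rintro ⟨u, hu⟩
      simp only [List.singleton_append] at hu
      cases hu; simp
    · intro h; simp at h; subst h; exact ⟨t', rfl⟩

lemma singleton_prefix_drop (c : Char) (s : List Char) (i : Nat) :
    [c] <+: s.drop i ↔ s[i]? = some c := by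
  rw [singleton_prefix_iff, List.head?_drop]

lemma findIdx_lt_of_mem (s : List Char) (c : Char) (h : c ∈ s) :
    s.findIdx (· == c) < s.length :=
  List.findIdx_lt_length.mpr ⟨c, h, by simp⟩

lemma getElem_findIdx_of_mem (s : List Char) (c : Char) (h : c ∈ s) :
    s[s.findIdx (· == c)]'(findIdx_lt_of_mem s c h) = c := by
  have := List.findIdx_getElem (p := (· == c)) (xs := s) (w := findIdx_lt_of_mem s c h)
  simpa using this

lemma findIdx_min (s : List Char) (c : Char) (j : Nat) (hj : j < s.length)
    (h : s[j]'hj = c) : s.findIdx (· == c) ≤ j := by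
  by_contra hcon
  push_neg at hcon
  have hfalse := List.not_of_lt_findIdx (p := (· == c)) (xs := s) hcon
  simp at hfalse
  exact hfalse h

lemma find_singleton (s : List Char) (c : Char) :
    PySem.Chars.find s [c] = if c ∈ s then ((s.findIdx (· == c) : Nat) : Int) else -1 := by
  split_ifs with hmem
  · have hinf : [c] <:+: s := (singleton_infix_iff c s).mpr hmem
    have h0 : 0 ≤ PySem.Chars.find s [c] := (PySem.Chars.find_nonneg_iff s [c]).mpr hinf
    obtain ⟨hpre, hmin⟩ := PySem.Chars.find_spec (s := s) (sub := [c]) h0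
    set f := (PySem.Chars.find s [c]).toNat with hf
    have hget : s[f]? = some c := (singleton_prefix_drop c s f).mp hpre
    have hflen : f < s.length := (List.getElem?_eq_some_iff.mp hget).1
    have hgetf : s[f]'hflen = c := by
      have := (List.getElem?_eq_some_iff.mp hget).2; exact this
    set j := s.findIdx (· == c) with hj
    have hjlt : j < s.length := findIdx_lt_of_mem s c hmem
    have hjget : s[j]'hjlt = c := getElem_findIdx_of_mem s c hmem
    have h1 : j ≤ f := findIdx_min s c f hflen hgetf
    have h2 : ¬ (j < f) := by
      intro hlt
      exact hmin j hlt ((singleton_prefix_drop c s j).mpr (List.getElem?_eq_some_iff.mpr ⟨hjlt, hjget⟩))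
    have : j = f := by omega
    omega
  · exact (PySem.Chars.find_eq_neg_one_iff s [c]).mpr
      (fun h => hmem ((singleton_infix_iff c s).mp h))

lemma mem_take_iff (s : List Char) (c : Char) (m : Nat) :
    c ∈ s.take m ↔ c ∈ s ∧ s.findIdx (· == c) < m := by
  constructor
  · intro h
    obtain ⟨j, hj, hget⟩ := List.getElem_of_mem h
    have hjlen : j < s.length := by simp at hj; omega
    have hjm : j < m := by simp at hj; omega
    have hs : s[j]'hjlen = c := by rwa [List.getElem_take] at hget
    have hmem : c ∈ s := hs ▸ List.getElem_mem hjlen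
    exact ⟨hmem, lt_of_le_of_lt (findIdx_min s c j hjlen hs) hjm⟩
  · rintro ⟨hmem, hlt⟩
    have hjlt := findIdx_lt_of_mem s c hmem
    have hlen : s.findIdx (· == c) < (s.take m).length := by
      rw [List.length_take]; omega
    have : (s.take m)[s.findIdx (· == c)]'hlen = c := by
      rw [List.getElem_take]; exact getElem_findIdx_of_mem s c hmem
    exact this ▸ List.getElem_mem hlen

lemma findIdx_take (s : List Char) (c : Char) (m : Nat)
    (hmem : c ∈ s) (h : s.findIdx (· == c) < m) :
    (s.take m).findIdx (· == c) = s.findIdx (· == c) := by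
  have hmemt : c ∈ s.take m := (mem_take_iff s c m).mpr ⟨hmem, h⟩
  have hjlt := findIdx_lt_of_mem s c hmem
  have hlen : s.findIdx (· == c) < (s.take m).length := by
    rw [List.length_take]; omega
  have hget : (s.take m)[s.findIdx (· == c)]'hlen = c := by
    rw [List.getElem_take]; exact getElem_findIdx_of_mem s c hmem
  have h1 : (s.take m).findIdx (· == c) ≤ s.findIdx (· == c) :=
    findIdx_min _ c _ hlen hget
  have h2lt := findIdx_lt_of_mem _ c hmemt
  have hgetlen : (s.take m).findIdx (· == c) < s.length := by simp at h2lt; omega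
  have h2get : s[(s.take m).findIdx (· == c)]'hgetlen = c := by
    have := getElem_findIdx_of_mem _ c hmemt
    rwa [List.getElem_take] at this
  have h2 : s.findIdx (· == c) ≤ (s.take m).findIdx (· == c) :=
    findIdx_min s c _ hgetlen h2get
  omega

lemma findFrom_some_eq (l sub : List Char) (k m : Nat) (hkm : k + m ≤ l.length) :
    PySem.Chars.findFrom l sub (↑k) (some ((↑(k + m) : Nat) : Int)) =
      if PySem.Chars.find ((l.drop k).take m) sub = -1 then -1
      else ↑k + PySem.Chars.find ((l.drop k).take m) sub := by
  simp only [PySem.Chars.findFrom]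
  have h1 : ¬ ((l.length : Int) < ((k + m : Nat) : Int)) := by push_cast; omega
  have h2 : ¬ (((k + m : Nat) : Int) < 0) := by push_cast; omega
  have h3 : ¬ ((k : Int) < 0) := by push_cast; omega
  have h4 : ¬ (((k + m : Nat) : Int) < (k : Int)) := by push_cast; omega
  rw [if_neg h1, if_neg h2, if_neg h3, if_neg h4]
  have h5 : ((↑(k + m) : Int)).toNat = k + m := by omega
  have h6 : ((k : Int)).toNat = k := by omega
  rw [h5, h6, List.drop_take]
  have h7 : k + m - k = m := by omega
  rw [h7]

lemma pos_eq (l : List Char) (k : Nat) (hk : k ≤ l.length) (c : Char) :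
    PySem.Chars.findFrom l [c] (↑k) none
      = (if c ∈ l.drop k then ((↑(k + (l.drop k).findIdx (· == c)) : Nat) : Int) else -1) := by
  rw [PySem.Chars.findFrom_natCast l [c] k hk, find_singleton]
  split_ifs <;> push_cast <;> omega

lemma endauth_spec (l : List Char) (k : Nat) (hk : k ≤ l.length) :
    ∃ r : Nat,
      (List.foldl (fun e sep =>
          if PySem.Chars.findFrom l [sep] (↑k) none ≠ -1 then
            min e (PySem.Chars.findFrom l [sep] (↑k) none) else e) ((l.length : Int)) ['/', '?', '#'])
        = ((↑(k + r) : Nat) : Int)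
      ∧ r ≤ l.length - k
      ∧ (∀ c, c ∈ (['/', '?', '#'] : List Char) → c ∈ l.drop k → r ≤ (l.drop k).findIdx (· == c))
      ∧ (r = l.length - k ∨ ∃ c, c ∈ (['/', '?', '#'] : List Char) ∧ c ∈ l.drop k ∧ r = (l.drop k).findIdx (· == c)) := by
  simp only [List.foldl]
  rw [pos_eq l k hk '/', pos_eq l k hk '?', pos_eq l k hk '#']
  by_cases h1 : '/' ∈ l.drop k <;> by_cases h2 : '?' ∈ l.drop k <;> by_cases h3 : '#' ∈ l.drop k <;>
    simp only [h1, h2, h3, if_true, if_false]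
  · have g1 := findIdx_lt_of_mem (l.drop k) '/' h1
    have g2 := findIdx_lt_of_mem (l.drop k) '?' h2
    have g3 := findIdx_lt_of_mem (l.drop k) '#' h3
    refine ⟨(min (min (min (l.length - k) ((l.drop k).findIdx (· == '/'))) ((l.drop k).findIdx (· == '?'))) ((l.drop k).findIdx (· == '#'))), by split_ifs <;> omega, by omega, ?_, ?_⟩
    · intro c hc hcd
      fin_cases hc
      · omega
      · omega
      · omega
    · have hor : (min (min (min (l.length - k) ((l.drop k).findIdx (· == '/'))) ((l.drop k).findIdx (· == '?'))) ((l.drop k).findIdx (· == '#'))) = (l.length - k) ∨ (min (min (min (l.length - k) ((l.drop k).findIdx (· == '/'))) ((l.drop k).findIdx (· == '?'))) ((l.drop k).findIdx (· == '#'))) = (l.drop k).findIdx (· == '/') ∨ (min (min (min (l.length - k) ((l.drop k).findIdx (· == '/'))) ((l.drop k).findIdx (· == '?'))) ((l.drop k).findIdx (· == '#'))) = (l.drop k).findIdx (· == '?') ∨ (min (min (min (l.length - k) ((l.drop k).findIdx (· == '/'))) ((l.drop k).findIdx (· == '?'))) ((l.drop k).findIdx (· == '#'))) = (l.drop k).findIdx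 (· == '#') := by omega
      rcases hor with hh|hh|hh|hh
      · exact Or.inl hh
      · exact Or.inr ⟨'/', by simp, h1, hh⟩
      · exact Or.inr ⟨'?', by simp, h2, hh⟩
      · exact Or.inr ⟨'#', by simp, h3, hh⟩
  · have g1 := findIdx_lt_of_mem (l.drop k) '/' h1
    have g2 := findIdx_lt_of_mem (l.drop k) '?' h2
    refine ⟨(min (min (l.length - k) ((l.drop k).findIdx (· == '/'))) ((l.drop k).findIdx (· == '?'))), by split_ifs <;> omega, by omega, ?_, ?_⟩
    · intro c hc hcd
      fin_cases hc
      · omega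
      · omega
      · exact absurd hcd h3
    · have hor : (min (min (l.length - k) ((l.drop k).findIdx (· == '/'))) ((l.drop k).findIdx (· == '?'))) = (l.length - k) ∨ (min (min (l.length - k) ((l.drop k).findIdx (· == '/'))) ((l.drop k).findIdx (· == '?'))) = (l.drop k).findIdx (· == '/') ∨ (min (min (l.length - k) ((l.drop k).findIdx (· == '/'))) ((l.drop k).findIdx (· == '?'))) = (l.drop k).findIdx (· == '?') := by omega
      rcases hor with hh|hh|hh
      · exact Or.inl hh
      · exact Or.inr ⟨'/', by simp, h1, hh⟩
      · exact Or.inr ⟨'?', by simp, h2, hh⟩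
  · have g1 := findIdx_lt_of_mem (l.drop k) '/' h1
    have g3 := findIdx_lt_of_mem (l.drop k) '#' h3
    refine ⟨(min (min (l.length - k) ((l.drop k).findIdx (· == '/'))) ((l.drop k).findIdx (· == '#'))), by split_ifs <;> omega, by omega, ?_, ?_⟩
    · intro c hc hcd
      fin_cases hc
      · omega
      · exact absurd hcd h2
      · omega
    · have hor : (min (min (l.length - k) ((l.drop k).findIdx (· == '/'))) ((l.drop k).findIdx (· == '#'))) = (l.length - k) ∨ (min (min (l.length - k) ((l.drop k).findIdx (· == '/'))) ((l.drop k).findIdx (· == '#'))) = (l.drop k).findIdx (· == '/') ∨ (min (min (l.length - k) ((l.drop k).findIdx (· == '/'))) ((l.drop k).findIdx (· == '#'))) = (l.drop k).findIdx (· == '#') := by omega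
      rcases hor with hh|hh|hh
      · exact Or.inl hh
      · exact Or.inr ⟨'/', by simp, h1, hh⟩
      · exact Or.inr ⟨'#', by simp, h3, hh⟩
  · have g1 := findIdx_lt_of_mem (l.drop k) '/' h1
    refine ⟨(min (l.length - k) ((l.drop k).findIdx (· == '/'))), by split_ifs <;> omega, by omega, ?_, ?_⟩
    · intro c hc hcd
      fin_cases hc
      · omega
      · exact absurd hcd h2
      · exact absurd hcd h3
    · have hor : (min (l.length - k) ((l.drop k).findIdx (· == '/'))) = (l.length - k) ∨ (min (l.length - k) ((l.drop k).findIdx (· == '/'))) = (l.drop k).findIdx (· == '/') := by omega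
      rcases hor with hh|hh
      · exact Or.inl hh
      · exact Or.inr ⟨'/', by simp, h1, hh⟩
  · have g2 := findIdx_lt_of_mem (l.drop k) '?' h2
    have g3 := findIdx_lt_of_mem (l.drop k) '#' h3
    refine ⟨(min (min (l.length - k) ((l.drop k).findIdx (· == '?'))) ((l.drop k).findIdx (· == '#'))), by split_ifs <;> omega, by omega, ?_, ?_⟩
    · intro c hc hcd
      fin_cases hc
      · exact absurd hcd h1
      · omega
      · omega
    · have hor : (min (min (l.length - k) ((l.drop k).findIdx (· == '?'))) ((l.drop k).findIdx (· == '#'))) = (l.length - k) ∨ (min (min (l.length - k) ((l.drop k).findIdx (· == '?'))) ((l.drop k).findIdx (· == '#'))) = (l.drop k).findIdx (· == '?') ∨ (min (min (l.length - k) ((l.drop k).findIdx (· == '?'))) ((l.drop k).findIdx (· == '#'))) = (l.drop k).findIdx (· == '#') := by omega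
      rcases hor with hh|hh|hh
      · exact Or.inl hh
      · exact Or.inr ⟨'?', by simp, h2, hh⟩
      · exact Or.inr ⟨'#', by simp, h3, hh⟩
  · have g2 := findIdx_lt_of_mem (l.drop k) '?' h2
    refine ⟨(min (l.length - k) ((l.drop k).findIdx (· == '?'))), by split_ifs <;> omega, by omega, ?_, ?_⟩
    · intro c hc hcd
      fin_cases hc
      · exact absurd hcd h1
      · omega
      · exact absurd hcd h3
    · have hor : (min (l.length - k) ((l.drop k).findIdx (· == '?'))) = (l.length - k) ∨ (min (l.length - k) ((l.drop k).findIdx (· == '?'))) = (l.drop k).findIdx (· == '?') := by omega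
      rcases hor with hh|hh
      · exact Or.inl hh
      · exact Or.inr ⟨'?', by simp, h2, hh⟩
  · have g3 := findIdx_lt_of_mem (l.drop k) '#' h3
    refine ⟨(min (l.length - k) ((l.drop k).findIdx (· == '#'))), by split_ifs <;> omega, by omega, ?_, ?_⟩
    · intro c hc hcd
      fin_cases hc
      · exact absurd hcd h1
      · exact absurd hcd h2
      · omega
    · have hor : (min (l.length - k) ((l.drop k).findIdx (· == '#'))) = (l.length - k) ∨ (min (l.length - k) ((l.drop k).findIdx (· == '#'))) = (l.drop k).findIdx (· == '#') := by omega
      rcases hor with hh|hh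
      · exact Or.inl hh
      · exact Or.inr ⟨'#', by simp, h3, hh⟩
  · refine ⟨(l.length - k), by split_ifs <;> omega, by omega, ?_, ?_⟩
    · intro c hc hcd
      fin_cases hc
      · exact absurd hcd h1
      · exact absurd hcd h2
      · exact absurd hcd h3
    · exact Or.inl rfl

lemma masked_eq (pw mk : List Char) (p : Bool) :
    (if p = true ∧ pw ≠ [] then
        if pw.length = 1 then ['*']
        else if pw.length = 2 then (PySem.List.pyGet? pw 0).toList ++ ['*']
        else (PySem.List.pyGet? pw 0).toList ++ List.replicate (pw.length - 2) '*'
             ++ (PySem.List.pyGet? pw (-1)).toList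
      else mk)
    = (if p = true ∧ pw ≠ [] then
        (if pw.length < 2 then [] else (PySem.List.pyGet? pw 0).toList)
        ++ List.replicate (max 1 (pw.length - 2)) '*'
        ++ (if pw.length < 3 then [] else (PySem.List.pyGet? pw (-1)).toList)
      else mk) := by
  by_cases hp : p = true ∧ pw ≠ []
  · simp only [if_pos hp]
    have hlen : 1 ≤ pw.length := by
      rcases hp with ⟨_, hne⟩
      have := List.length_pos_of_ne_nil hne
      omega
    by_cases e1 : pw.length = 1
    · simp [e1]
    · by_cases e2 : pw.length = 2
      · simp [e2]
      · have hm : max 1 (pw.length - 2) = pw.length - 2 := by omega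
        have h2 : ¬ (pw.length < 2) := by omega
        have h3 : ¬ (pw.length < 3) := by omega
        simp [e1, e2, hm, h2, h3, List.append_assoc]
  · simp only [if_neg hp]

lemma findIdxP_not_before (p : Char → Bool) (s : List Char) (j : Nat) (x : Char)
    (hlt : j < s.findIdx p) (hget : s[j]? = some x) : p x = false := by
  have hjlen : j < s.length := (List.getElem?_eq_some_iff.mp hget).1
  have h1 : s[j]'hjlen = x := (List.getElem?_eq_some_iff.mp hget).2
  have h2 := List.not_of_lt_findIdx (p := p) (xs := s) hlt
  rw [← h1]
  exact h2

-- ===== B-side lemmas: the scheme scanner =====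

lemma startsScheme_iff (l : List Char) : pvStartsScheme l = true ↔ [':', '/', '/'] <+: l := by
  match l with
  | [] =>
    constructor
    · intro h; simp [pvStartsScheme] at h
    · intro h; exact absurd h.length_le (by simp)
  | [c1] =>
    constructor
    · intro h; simp [pvStartsScheme] at h
    · intro h; exact absurd h.length_le (by simp)
  | [c1, c2] =>
    constructor
    · intro h; simp [pvStartsScheme] at h
    · intro h; exact absurd h.length_le (by simp)
  | c1 :: c2 :: c3 :: t =>
    constructor
    · intro h
      have h' : (decide (c1 = ':') && decide (c2 = '/') && decide (c3 = '/')) = true := h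
      simp only [Bool.and_eq_true, decide_eq_true_eq] at h'
      obtain ⟨⟨e1, e2⟩, e3⟩ := h'
      subst e1; subst e2; subst e3
      exact ⟨t, rfl⟩
    · intro h
      rcases List.cons_prefix_cons.mp h with ⟨e1, h'⟩
      rcases List.cons_prefix_cons.mp h' with ⟨e2, h''⟩
      rcases List.cons_prefix_cons.mp h'' with ⟨e3, _⟩
      subst e1; subst e2; subst e3
      simp [pvStartsScheme]

lemma pvFindScheme_spec (l : List Char) : ∀ (i : Nat),
    (pvFindScheme l i = none ∧ ∀ j, ¬ ([':', '/', '/'] <+: l.drop j)) ∨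
    (∃ k, pvFindScheme l i = some (i + k) ∧ ([':', '/', '/'] <+: l.drop k) ∧
      ∀ j < k, ¬ ([':', '/', '/'] <+: l.drop j)) := by
  induction l with
  | nil =>
    intro i; left
    refine ⟨rfl, fun j h => ?_⟩
    simp at h
  | cons c rest ih =>
    intro i
    by_cases hs : pvStartsScheme (c :: rest) = true
    · right
      exact ⟨0, by simp [pvFindScheme, hs], by simpa using (startsScheme_iff _).mp hs,
        fun j hj => absurd hj (by omega)⟩
    · have hstep : pvFindScheme (c :: rest) i = pvFindScheme rest (i + 1) := by
        simp [pvFindScheme, hs]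
      rcases ih (i + 1) with ⟨hn, hall⟩ | ⟨k, hk, hpre, hmin⟩
      · left
        refine ⟨by rw [hstep]; exact hn, fun j h => ?_⟩
        match j with
        | 0 => exact hs ((startsScheme_iff _).mpr (by simpa using h))
        | j + 1 => exact hall j (by simpa using h)
      · right
        refine ⟨k + 1, by rw [hstep, hk]; congr 1; omega, by simpa using hpre, fun j hj h => ?_⟩
        match j with
        | 0 => exact hs ((startsScheme_iff _).mpr (by simpa using h))
        | j + 1 => exact hmin j (by omega) (by simpa using h)

lemma prefix_drop_iff_infix (p l : List Char) :
    (∃ j, p <+: l.drop j) ↔ p <:+: l := by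
  constructor
  · rintro ⟨j, t, ht⟩
    refine ⟨l.take j, t, ?_⟩
    rw [List.append_assoc, ht, List.take_append_drop]
  · rintro ⟨s1, s2, rfl⟩
    exact ⟨s1.length, s2, by simp⟩

lemma pvFindScheme_eq (l : List Char) :
    pvFindScheme l 0 =
      if PySem.Chars.find l [':', '/', '/'] = -1 then none
      else some (PySem.Chars.find l [':', '/', '/']).toNat := by
  rcases pvFindScheme_spec l 0 with ⟨hn, hall⟩ | ⟨k, hk, hpre, hmin⟩
  · have : PySem.Chars.find l [':', '/', '/'] = -1 := by
      apply (PySem.Chars.find_eq_neg_one_iff l [':', '/', '/']).mpr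
      intro hinf
      obtain ⟨j, hj⟩ := (prefix_drop_iff_infix [':', '/', '/'] l).mpr hinf
      exact hall j hj
    rw [if_pos this]; exact hn
  · have hinf : [':', '/', '/'] <:+: l :=
      (prefix_drop_iff_infix [':', '/', '/'] l).mp ⟨k, hpre⟩
    have h0 : 0 ≤ PySem.Chars.find l [':', '/', '/'] := (PySem.Chars.find_nonneg_iff l _).mpr hinf
    have hne : ¬ (PySem.Chars.find l [':', '/', '/'] = -1) := by omega
    rw [if_neg hne]
    obtain ⟨hpre', hmin'⟩ := PySem.Chars.find_spec (s := l) (sub := [':', '/', '/']) h0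
    set f := (PySem.Chars.find l [':', '/', '/']).toNat with hf
    have h1 : ¬ (k < f) := fun h => hmin' k h hpre
    have h2 : ¬ (f < k) := fun h => hmin f h hpre'
    have : k = f := by omega
    rw [hk, this]; simp

-- ===== B-side lemmas: the authority scanner =====

def uiStep (st : List Char × Option (List Char)) (c : Char) : List Char × Option (List Char) :=
  match st.2 with
  | some pwd => (st.1, some (pwd ++ [c]))
  | none => if c = ':' then (st.1, some []) else (st.1 ++ [c], none)

lemma authScan_no_at (s : List Char) (a : Nat) (mk : List Char) (p : Bool) :
    ∀ (d : List Char) (i : Nat) (user : List Char) (pwdOpt : Option (List Char)),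
      '@' ∉ d → pvAuthScan s a mk p d i user pwdOpt = none := by
  intro d
  induction d with
  | nil => intro i user pwdOpt _; rfl
  | cons c rest ih =>
    intro i user pwdOpt h
    have hc : c ≠ '@' := fun hh => h (hh ▸ List.mem_cons_self)
    have hrest : '@' ∉ rest := fun hh => h (List.mem_cons_of_mem _ hh)
    by_cases hsep : c = '/' ∨ c = '?' ∨ c = '#'
    · simp [pvAuthScan, hsep]
    · cases pwdOpt with
      | some pwd => simp [pvAuthScan, hsep, hc]; exact ih _ _ _ hrest
      | none =>
        by_cases hcol : c = ':'
        · simp [pvAuthScan, hcol]; exact ih _ _ _ hrest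
        · simp [pvAuthScan, hsep, hc, hcol]; exact ih _ _ _ hrest

lemma authScan_append (s : List Char) (a : Nat) (mk : List Char) (p : Bool) :
    ∀ (u t : List Char) (i : Nat) (user : List Char) (pwdOpt : Option (List Char)),
      (∀ c ∈ u, ¬ (c = '/' ∨ c = '?' ∨ c = '#' ∨ c = '@')) →
      pvAuthScan s a mk p (u ++ t) i user pwdOpt =
        pvAuthScan s a mk p t (i + u.length)
          (u.foldl uiStep (user, pwdOpt)).1 (u.foldl uiStep (user, pwdOpt)).2 := by
  intro u
  induction u with
  | nil => intro t i user pwdOpt _; simp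
  | cons c u' ih =>
    intro t i user pwdOpt h
    have hc := h c List.mem_cons_self
    push_neg at hc
    obtain ⟨h1, h2, h3, h4⟩ := hc
    have hsep : ¬ (c = '/' ∨ c = '?' ∨ c = '#') := by tauto
    have hrest : ∀ x ∈ u', ¬ (x = '/' ∨ x = '?' ∨ x = '#' ∨ x = '@') :=
      fun x hx => h x (List.mem_cons_of_mem _ hx)
    have harith : i + 1 + u'.length = i + (c :: u').length := by simp; omega
    cases pwdOpt with
    | some pwd =>
      simp only [List.cons_append, pvAuthScan, if_neg hsep, if_neg h4]
      rw [ih t (i + 1) user (some (pwd ++ [c])) hrest]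
      have hstep : uiStep (user, some pwd) c = (user, some (pwd ++ [c])) := rfl
      rw [List.foldl_cons, hstep, harith]
    | none =>
      by_cases hcol : c = ':'
      · simp only [List.cons_append, pvAuthScan, if_neg hsep, if_neg h4, if_pos hcol]
        rw [ih t (i + 1) user (some []) hrest]
        have hstep : uiStep (user, none) c = (user, some []) := by simp [uiStep, hcol]
        rw [List.foldl_cons, hstep, harith]
      · simp only [List.cons_append, pvAuthScan, if_neg hsep, if_neg h4, if_neg hcol]
        rw [ih t (i + 1) (user ++ [c]) none hrest]
        have hstep : uiStep (user, none) c = (user ++ [c], none) := by simp [uiStep, hcol]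
        rw [List.foldl_cons, hstep, harith]

lemma foldl_uiStep_some (v : List Char) : ∀ (user pwd : List Char),
    v.foldl uiStep (user, some pwd) = (user, some (pwd ++ v)) := by
  induction v with
  | nil => intro user pwd; simp
  | cons c v' ih =>
    intro user pwd
    simp only [List.foldl_cons, uiStep]
    rw [ih user (pwd ++ [c])]
    simp

lemma foldl_uiStep_no_colon (u : List Char) (h : ':' ∉ u) : ∀ (user : List Char),
    u.foldl uiStep (user, none) = (user ++ u, none) := by
  induction u with
  | nil => intro user; simp
  | cons c u' ih =>
    intro user
    have hc : c ≠ ':' := fun hh => h (hh ▸ List.mem_cons_self)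
    have hu' : ':' ∉ u' := fun hh => h (List.mem_cons_of_mem _ hh)
    simp only [List.foldl_cons, uiStep, if_neg hc]
    rw [ih hu' (user ++ [c])]
    simp

lemma foldl_uiStep_colon (u : List Char) (h : ':' ∈ u) : ∀ (user : List Char),
    u.foldl uiStep (user, none) =
      (user ++ u.take (u.findIdx (· == ':')), some (u.drop (u.findIdx (· == ':') + 1))) := by
  induction u with
  | nil => intro user; simp at h
  | cons c u' ih =>
    intro user
    by_cases hc : c = ':'
    · subst hc
      have hstep : uiStep (user, none) ':' = (user, some []) := rfl
      rw [List.foldl_cons, hstep, foldl_uiStep_some]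
      simp [List.findIdx_cons]
    · have hu' : ':' ∈ u' := by
        rcases List.mem_cons.mp h with h | h
        · exact absurd h.symm hc
        · exact h
      have hstep : uiStep (user, none) c = (user ++ [c], none) := by simp [uiStep, hc]
      rw [List.foldl_cons, hstep, ih hu' (user ++ [c])]
      have hfind : (c :: u').findIdx (· == ':') = u'.findIdx (· == ':') + 1 := by
        rw [List.findIdx_cons]
        have hb : (c == ':') = false := by simp [hc]
        rw [hb, Bool.cond_false]
      rw [hfind]
      simp

lemma authScan_at_head (s : List Char) (a : Nat) (mk : List Char) (p : Bool) (t : List Char) (i : Nat)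
    (user pwd : List Char) :
    pvAuthScan s a mk p ('@' :: t) i user (some pwd) =
      some (s.take a ++ user ++ [':'] ++
        (if p = true ∧ pwd ≠ [] then
            (if pwd.length < 2 then [] else (PySem.List.pyGet? pwd 0).toList)
            ++ List.replicate (max 1 (pwd.length - 2)) '*'
            ++ (if pwd.length < 3 then [] else (PySem.List.pyGet? pwd (-1)).toList)
          else mk) ++ s.drop i) := by
  simp [pvAuthScan, List.append_assoc]

-- ===== the main agreement proof =====

theorem ports_agree (uri mask : String) (p : Bool) :
    obscure_password uri mask p = obscure_password_alt uri mask p := by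
  simp only [obscure_password, obscure_password_alt]
  by_cases hnil : uri.toList = []
  · simp [hnil]
  simp only [if_neg hnil]
  rw [pvFindScheme_eq]
  by_cases hF1 : PySem.Chars.find uri.toList [':', '/', '/'] = -1
  · simp [hF1]
  simp only [hF1, if_false]
  set l := uri.toList with hl
  have hFneg1 := PySem.Chars.neg_one_le_find l [':', '/', '/']
  have hFlen := PySem.Chars.find_le_length l [':', '/', '/']
  have hF0 : (0:Int) ≤ PySem.Chars.find l [':', '/', '/'] := by omega
  set i := (PySem.Chars.find l [':', '/', '/']).toNat with hi
  have hFi : PySem.Chars.find l [':', '/', '/'] = (i : Int) := by omega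
  have hpre3 : [':', '/', '/'] <+: l.drop i := by
    have h := (PySem.Chars.find_spec (s := l) (sub := [':', '/', '/']) hF0).1
    rwa [← hi] at h
  have hklen : i + 3 ≤ l.length := by
    have h := hpre3.length_le
    simp [List.length_drop] at h
    omega
  have hauth : PySem.Chars.find l [':', '/', '/'] + 3 = ((i + 3 : Nat) : Int) := by
    rw [hFi]; push_cast; ring
  rw [hauth]
  obtain ⟨r, hre, hrle, hrmin, hrcase⟩ := endauth_spec l (i + 3) (by omega)
  rw [hre]
  rw [findFrom_some_eq l ['@'] (i + 3) r (by omega)]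
  set d := List.drop (i + 3) l with hd
  have hdlen : d.length = l.length - (i + 3) := by rw [hd, List.length_drop]
  by_cases hat : '@' ∈ d
  · -- an '@' exists in the post-scheme part
    have hJlt := findIdx_lt_of_mem d '@' hat
    set J := List.findIdx (fun x => x == '@') d with hJ
    have hfind_at : PySem.Chars.find d ['@'] = (J : Int) := by
      rw [find_singleton, if_pos hat, ← hJ]
    have hJneg : ¬ ((J : Int) = -1) := by omega
    by_cases hspec : ∃ c ∈ (['/', '?', '#'] : List Char), c ∈ List.take J d
    · -- a path separator precedes the first '@': nothing is masked
      obtain ⟨c, hc, hcT⟩ := hspec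
      obtain ⟨hcd, hclt⟩ := (mem_take_iff d c J).mp hcT
      have hrc := hrmin c hc hcd
      have hnotT : ¬ '@' ∈ List.take r d := by
        intro h
        have h2 := (mem_take_iff d '@' r).mp h
        omega
      have hAneg : PySem.Chars.find (List.take r d) ['@'] = -1 := by
        rw [find_singleton, if_neg hnotT]
      -- B side: the FIRST stop char of d is a separator, so the scan bails out
      have hPex : d.findIdx (fun x => x == '/' || x == '?' || x == '#' || x == '@') < d.length := by
        apply List.findIdx_lt_length.mpr
        refine ⟨c, hcd, ?_⟩
        fin_cases hc <;> simp
      set K := d.findIdx (fun x => x == '/' || x == '?' || x == '#' || x == '@') with hK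
      have hPK := List.findIdx_getElem (p := fun x => x == '/' || x == '?' || x == '#' || x == '@')
        (xs := d) (w := hPex)
      have hKle : K ≤ d.findIdx (· == c) := by
        by_contra hcon
        push_neg at hcon
        have hgc : d[d.findIdx (· == c)]? = some c := by
          rw [List.getElem?_eq_getElem (findIdx_lt_of_mem d c hcd)]
          exact congrArg some (getElem_findIdx_of_mem d c hcd)
        have hfalse := findIdxP_not_before _ d _ c hcon hgc
        fin_cases hc <;> simp at hfalse
      have hKJ : K < J := by omega
      have hKnotAt : d[K]'hPex ≠ '@' := by
        intro h
        have := findIdx_min d '@' K hPex h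
        omega
      have hKsep : d[K]'hPex = '/' ∨ d[K]'hPex = '?' ∨ d[K]'hPex = '#' := by
        simp at hPK
        tauto
      have hufree : ∀ x ∈ d.take K, ¬ (x = '/' ∨ x = '?' ∨ x = '#' ∨ x = '@') := by
        intro x hx hor
        obtain ⟨j, hget⟩ := List.mem_iff_getElem?.mp hx
        rw [List.getElem?_take] at hget
        by_cases hjK : j < K
        · rw [if_pos hjK] at hget
          have hfalse := findIdxP_not_before _ d j x hjK hget
          rcases hor with h | h | h | h <;> subst h <;> simp at hfalse
        · rw [if_neg hjK] at hget
          simp at hget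
      have hsplit : d = d.take K ++ d[K]'hPex :: d.drop (K + 1) := by
        conv_lhs => rw [← List.take_append_drop K d]
        congr 1
        rw [List.drop_eq_getElem_cons hPex]
      have hBnone : pvAuthScan l (i + 3) mask.toList p d (i + 3) [] none = none := by
        conv_lhs => rw [hsplit]
        rw [authScan_append l (i + 3) mask.toList p (d.take K) _ (i + 3) [] none hufree]
        simp [pvAuthScan, hKsep]
      rw [hBnone]
      simp [hAneg]
    · -- the first '@' comes before any of '/', '?', '#'
      have hJr : J < r := by
        rcases hrcase with hcase | ⟨c, hc, hcd, hrfI⟩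
        · omega
        · have h1 : ¬ (List.findIdx (fun x => x == c) d < J) := by
            intro hlt
            exact hspec ⟨c, hc, (mem_take_iff d c J).mpr ⟨hcd, hlt⟩⟩
          have hcne : c ≠ '@' := by
            fin_cases hc <;> decide
          have hne : List.findIdx (fun x => x == c) d ≠ J := by
            intro heq
            apply hcne
            have hgc : d[List.findIdx (fun x => x == c) d]? = some c := by
              rw [List.getElem?_eq_getElem (findIdx_lt_of_mem d c hcd)]
              exact congrArg some (getElem_findIdx_of_mem d c hcd)
            have hga : d[List.findIdx (fun x => x == '@') d]? = some '@' := by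
              rw [List.getElem?_eq_getElem (findIdx_lt_of_mem d '@' hat)]
              exact congrArg some (getElem_findIdx_of_mem d '@' hat)
            rw [heq] at hgc
            rw [← hJ] at hga
            rw [hgc] at hga
            exact Option.some.inj hga
          omega
      have hmemT : '@' ∈ List.take r d := (mem_take_iff d '@' r).mpr ⟨hat, by omega⟩
      have hfindTake : PySem.Chars.find (List.take r d) ['@'] = (J : Int) := by
        rw [find_singleton, if_pos hmemT, findIdx_take d '@' r hat (by omega), ← hJ]
      have hsum : ¬ (((i + 3 : Nat) : Int) + (J : Int) = -1) := by push_cast; omega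
      rw [hfindTake]
      have hcast : ((i + 3 : Nat) : Int) + (J : Int) = ((i + 3 + J : Nat) : Int) := by push_cast; ring
      rw [hcast] at hsum
      simp only [hJneg, if_false]
      rw [hcast, if_neg hsum]
      rw [PySem.List.slice_natCast l (i + 3) (i + 3 + J)]
      have hJJ : i + 3 + J - (i + 3) = J := by omega
      rw [hJJ, ← hd]
      set U := List.take J d with hU
      -- userinfo is stop-free
      have hufree : ∀ x ∈ U, ¬ (x = '/' ∨ x = '?' ∨ x = '#' ∨ x = '@') := by
        intro x hx hor
        rcases hor with h | h | h | h
        · exact hspec ⟨'/', by simp, h ▸ hx⟩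
        · exact hspec ⟨'?', by simp, h ▸ hx⟩
        · exact hspec ⟨'#', by simp, h ▸ hx⟩
        · subst h
          obtain ⟨_, hxlt⟩ := (mem_take_iff d '@' J).mp hx
          omega
      have hsplit : d = U ++ '@' :: d.drop (J + 1) := by
        conv_lhs => rw [← List.take_append_drop J d]
        congr 1
        rw [List.drop_eq_getElem_cons hJlt, getElem_findIdx_of_mem d '@' hat]
      have hUlen : U.length = J := by rw [hU, List.length_take]; omega
      -- evaluate B's scan: fold over U, then hit '@'
      have hBeval : pvAuthScan l (i + 3) mask.toList p d (i + 3) [] none =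
          pvAuthScan l (i + 3) mask.toList p ('@' :: d.drop (J + 1)) (i + 3 + J)
            (U.foldl uiStep ([], none)).1 (U.foldl uiStep ([], none)).2 := by
        conv_lhs => rw [hsplit]
        rw [authScan_append l (i + 3) mask.toList p U ('@' :: d.drop (J + 1)) (i + 3) [] none hufree]
        rw [hUlen]
      by_cases hcol : PySem.Chars.find U [':'] = -1
      · -- no colon in userinfo: both unchanged
        have hnoc : ':' ∉ U := by
          intro h
          rw [find_singleton, if_pos h] at hcol
          omega
        have hfold := foldl_uiStep_no_colon U hnoc []
        rw [hBeval, hfold]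
        simp [pvAuthScan, hcol]
      · have hcmem : ':' ∈ U := by
          by_contra h
          rw [find_singleton, if_neg h] at hcol
          exact hcol rfl
        have hfindc : PySem.Chars.find U [':'] = ((U.findIdx (· == ':') : Nat) : Int) := by
          rw [find_singleton, if_pos hcmem]
        set c0 := U.findIdx (· == ':') with hc0
        have hc0lt := findIdx_lt_of_mem U ':' hcmem
        rw [hfindc]
        have hc0neg : ¬ (((c0 : Nat) : Int) = -1) := by omega
        simp only [hc0neg, if_false]
        rw [PySem.List.slice_to U (b := ((c0 : Nat) : Int)) (by omega)]
        have h1cast : (((c0 : Nat) : Int)) + 1 = (((c0 + 1 : Nat)) : Int) := by push_cast; ring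
        rw [h1cast, PySem.List.slice_from U (a := ((c0 + 1 : Nat) : Int)) (by omega)]
        rw [PySem.List.slice_to l (b := ((i + 3 : Nat) : Int)) (by omega)]
        rw [PySem.List.slice_from l (a := ((i + 3 + J : Nat) : Int)) (by omega)]
        have ht1 : (((c0 : Nat) : Int)).toNat = c0 := by omega
        have ht2 : (((c0 + 1 : Nat) : Int)).toNat = c0 + 1 := by omega
        have ht3 : (((i + 3 : Nat) : Int)).toNat = i + 3 := by omega
        have ht4 : (((i + 3 + J : Nat) : Int)).toNat = i + 3 + J := by omega
        rw [ht1, ht2, ht3, ht4]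
        rw [masked_eq]
        have hfold := foldl_uiStep_colon U hcmem []
        rw [hBeval, hfold, List.nil_append, authScan_at_head]
        simp [hc0, List.append_assoc]
  · -- no '@' in the post-scheme part: both sides return the URI unchanged
    have hnotT : ¬ '@' ∈ List.take r d := fun h => hat (List.mem_of_mem_take h)
    have hAneg : PySem.Chars.find (List.take r d) ['@'] = -1 := by
      rw [find_singleton, if_neg hnotT]
    rw [authScan_no_at l (i + 3) mask.toList p d (i + 3) [] none hat]
    simp [hAneg]

-- ===== VERDICT (by name: the statement is the Claim_ definition above) =====
theorem obscure_password_spec : Claim_equal_obscure_password := by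
  intro cs mask p _ _
  unfold Spec_obscure_password
  exact ports_agree cs mask p
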